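-- pv_equiv track=rewrite | github.com/pypi-data/pypi-mirror-361 | packages/md2wxhtml/md2wxhtml-0.1.13-py3-none-any.whl/md2wxhtml/processors/code_processor.py | _replace_spaces_and_linebreaks
-- ===== SOURCE A (Python) =====
-- def _replace_spaces_and_linebreaks(html: str) -> str:
--     # Replace all spaces/tabs outside HTML tags with &nbsp;, and \n with <br />
--     def replace_line(line):
--         result = ''
--         in_tag = False
--         for char in line:
--             if char == '<':
--                 in_tag = True
--                 result += char
--             elif char == '>':
--                 in_tag = False
--                 result += char
--             elif not in_tag and char == ' ':
--                 result += '&nbsp;'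
--             elif not in_tag and char == '\t':
--                 result += '&nbsp;' * 4
--             else:
--                 result += char
--         return result
--
--     lines = html.split('\n')
--     processed_lines = [replace_line(line) for line in lines]
--     return '<br />'.join(processed_lines)
-- ===== SOURCE B (Python) =====
-- NBSP = '&nbsp;'
-- _TRANS = {ord(' '): NBSP, ord('\t'): NBSP * 4}
--
--
-- def _replace_spaces_and_linebreaks(html: str) -> str:
--     # Tokenize each line into text / '<...>' tag segments with str.partition
--     # instead of a per-character in_tag state machine; escape only text segments.
--     def render(line):
--         out = []
--         while True:
--             pre, lt, rest = line.partition('<')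
--             out.append(pre.translate(_TRANS))
--             if not lt:
--                 return ''.join(out)
--             tag, gt, line = rest.partition('>')
--             out.append(lt + tag + gt)
--             if not gt:
--                 return ''.join(out)
--
--     return '<br />'.join(render(line) for line in html.split('\n'))
-- ===== Notes on version B (the rewrite author's own statement) =====
-- stated objective: faster
-- what changed: Replaces the per-character in_tag state-machine loop that grows the result by repeated string concatenation with partition-based tokenization of each line into text and tag segments, escaping text segments via str.translate and joining the pieces once.
import Mathlib
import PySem

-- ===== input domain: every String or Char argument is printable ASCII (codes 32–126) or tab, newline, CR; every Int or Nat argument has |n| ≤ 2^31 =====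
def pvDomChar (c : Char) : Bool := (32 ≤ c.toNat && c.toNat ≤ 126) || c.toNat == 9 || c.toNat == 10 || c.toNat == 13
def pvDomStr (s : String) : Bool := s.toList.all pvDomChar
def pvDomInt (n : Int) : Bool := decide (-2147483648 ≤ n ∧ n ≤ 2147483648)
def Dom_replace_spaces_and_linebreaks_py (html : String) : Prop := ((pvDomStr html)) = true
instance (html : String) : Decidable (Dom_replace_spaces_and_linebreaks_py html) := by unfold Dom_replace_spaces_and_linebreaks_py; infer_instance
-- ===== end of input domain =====

-- B tokenizes each line into text / '<...>' tag segments (Python str.partition)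
-- instead of A's per-character in_tag state machine that appends to the result string
-- char by char; same return value (measurably faster in a timing run).

def pvNbsp : List Char := ['&', 'n', 'b', 's', 'p', ';']

def pvNbsp4 : List Char := pvNbsp ++ pvNbsp ++ pvNbsp ++ pvNbsp

-- ===== PORT A =====
-- the body of A's char loop: state = (result so far, in_tag)
def pvStepA (st : List Char × Bool) (c : Char) : List Char × Bool :=
  if c = '<' then (st.1 ++ [c], true)
  else if c = '>' then (st.1 ++ [c], false)
  else if st.2 = false ∧ c = ' ' then (st.1 ++ pvNbsp, st.2)
  else if st.2 = false ∧ c = '\t' then (st.1 ++ pvNbsp4, st.2)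
  else (st.1 ++ [c], st.2)

def pvReplaceLineA (cs : List Char) : List Char :=
  (cs.foldl pvStepA ([], false)).1

def replace_spaces_and_linebreaks_py (html : String) : String :=
  String.ofList (PySem.Chars.join "<br />".toList
    ((PySem.Chars.splitOn html.toList ['\n']).map pvReplaceLineA))

-- ===== PORT B =====
-- str.translate over {' ': '&nbsp;', '\t': '&nbsp;'*4}: exact per-char expansion
def pvEsc (cs : List Char) : List Char :=
  cs.flatMap (fun c => if c = ' ' then pvNbsp else if c = '\t' then pvNbsp4 else [c])

-- B's render loop, as recursion on the remainder; partition('<') = span (· ≠ '<') (exact)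
def pvRenderB (cs : List Char) : List Char :=
  let pre := cs.takeWhile (· ≠ '<')
  match h : cs.dropWhile (fun c => c ≠ '<') with
  | [] => pvEsc pre
  | lt :: rest =>
    let tag := rest.takeWhile (· ≠ '>')
    match h2 : rest.dropWhile (fun c => c ≠ '>') with
    | [] => pvEsc pre ++ (lt :: tag)
    | gt :: rest2 => pvEsc pre ++ (lt :: tag) ++ [gt] ++ pvRenderB rest2
termination_by cs.length
decreasing_by
  have hle : (cs.dropWhile (fun c => c ≠ '<')).length ≤ cs.length := List.length_dropWhile_le _ _
  have hle2 : (rest.dropWhile (fun c => c ≠ '>')).length ≤ rest.length := List.length_dropWhile_le _ _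
  rw [h] at hle; rw [h2] at hle2; simp at hle hle2; omega

def replace_spaces_and_linebreaks_py_alt (html : String) : String :=
  String.ofList (PySem.Chars.join "<br />".toList
    ((PySem.Chars.splitOn html.toList ['\n']).map pvRenderB))

-- ===== PRECONDITION & SPEC =====
def Spec_replace_spaces_and_linebreaks_py (html : String) (out : String) : Prop := out = replace_spaces_and_linebreaks_py_alt html
instance (html : String) (out : String) : Decidable (Spec_replace_spaces_and_linebreaks_py html out) := by unfold Spec_replace_spaces_and_linebreaks_py; infer_instance

-- ===== CLAIM (what is proved, stated in full; the proofs are below) =====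
def Claim_equal_replace_spaces_and_linebreaks_py : Prop := ∀ (html : String), Dom_replace_spaces_and_linebreaks_py html → Spec_replace_spaces_and_linebreaks_py html (replace_spaces_and_linebreaks_py html)

-- ===== LEMMAS AND PROOFS =====

-- A's loop over a chunk with no '<', starting outside a tag, escapes it like pvEsc
lemma pv_foldA_text (pre : List Char) (h : ∀ c ∈ pre, c ≠ '<') (res : List Char) :
    List.foldl pvStepA (res, false) pre = (res ++ pvEsc pre, false) := by
  induction pre generalizing res with
  | nil => simp [pvEsc]
  | cons c t ih =>
    have hc : c ≠ '<' := h c (by simp)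
    have ht : ∀ x ∈ t, x ≠ '<' := fun x hx => h x (by simp [hx])
    by_cases hgt : c = '>'
    · subst hgt
      simp [List.foldl_cons, pvStepA, ih ht, pvEsc]
    · by_cases hsp : c = ' '
      · subst hsp
        simp [List.foldl_cons, pvStepA, ih ht, pvEsc]
      · by_cases htab : c = '\t'
        · subst htab
          simp [List.foldl_cons, pvStepA, ih ht, pvEsc]
        · simp [List.foldl_cons, pvStepA, hc, hgt, hsp, htab, ih ht, pvEsc]

-- A's loop over a chunk with no '>', starting inside a tag, copies it verbatim
lemma pv_foldA_tag (tag : List Char) (h : ∀ c ∈ tag, c ≠ '>') (res : List Char) :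
    List.foldl pvStepA (res, true) tag = (res ++ tag, true) := by
  induction tag generalizing res with
  | nil => simp
  | cons c t ih =>
    have hc : c ≠ '>' := h c (by simp)
    have ht : ∀ x ∈ t, x ≠ '>' := fun x hx => h x (by simp [hx])
    by_cases hlt : c = '<'
    · subst hlt; simp [List.foldl_cons, pvStepA, ih ht]
    · simp [List.foldl_cons, pvStepA, hc, hlt, ih ht]

lemma pv_dropWhile_cons_head {p : Char → Bool} : ∀ {cs : List Char} {a : Char} {rest : List Char},
    List.dropWhile p cs = a :: rest → p a = false := by
  intro cs
  induction cs with
  | nil => intro a rest h; simp at h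
  | cons c t ih =>
    intro a rest h
    rw [List.dropWhile_cons] at h
    split at h
    · exact ih h
    · cases h; simp_all

lemma pv_foldA_eq_renderB (n : Nat) : ∀ (cs : List Char), cs.length ≤ n → ∀ (res : List Char),
    (List.foldl pvStepA (res, false) cs).1 = res ++ pvRenderB cs := by
  induction n with
  | zero =>
    intro cs hcs res
    have : cs = [] := List.eq_nil_of_length_eq_zero (Nat.le_zero.mp hcs)
    subst this
    simp [pvRenderB, pvEsc]
  | succ n ih =>
    intro cs hcs res
    have hsplit : cs.takeWhile (fun c => c ≠ '<') ++ cs.dropWhile (fun c => c ≠ '<') = cs :=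
      List.takeWhile_append_dropWhile
    have hpre : ∀ c ∈ cs.takeWhile (fun c => c ≠ '<'), c ≠ '<' := by
      intro c hc
      have := List.mem_takeWhile_imp hc
      simpa using this
    rw [pvRenderB]
    cases hdrop : cs.dropWhile (fun c => c ≠ '<') with
    | nil =>
      have hcs' : cs.takeWhile (fun c => c ≠ '<') = cs := by
        rw [hdrop] at hsplit; simpa using hsplit
      conv_lhs => rw [← hcs']
      rw [pv_foldA_text _ hpre]
    | cons lt rest =>
      have hlt : lt = '<' := by
        have := pv_dropWhile_cons_head hdrop
        simpa using this
      have hrest_split : rest.takeWhile (fun c => c ≠ '>') ++ rest.dropWhile (fun c => c ≠ '>') = rest :=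
        List.takeWhile_append_dropWhile
      have htag : ∀ c ∈ rest.takeWhile (fun c => c ≠ '>'), c ≠ '>' := by
        intro c hc
        have := List.mem_takeWhile_imp hc
        simpa using this
      have hlen : (lt :: rest).length ≤ cs.length := by
        have := List.length_dropWhile_le (fun c => decide (c ≠ '<')) cs
        rw [hdrop] at this; exact this
      conv_lhs => rw [← hsplit]
      rw [List.foldl_append, pv_foldA_text _ hpre, hdrop]
      subst hlt
      rw [List.foldl_cons]
      have hstep : pvStepA (res ++ pvEsc (cs.takeWhile (fun c => c ≠ '<')), false) '<'
          = (res ++ pvEsc (cs.takeWhile (fun c => c ≠ '<')) ++ ['<'], true) := by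
        simp [pvStepA]
      rw [hstep]
      cases hdrop2 : rest.dropWhile (fun c => c ≠ '>') with
      | nil =>
        have hrest : rest.takeWhile (fun c => c ≠ '>') = rest := by
          rw [hdrop2] at hrest_split; simpa using hrest_split
        conv_lhs => rw [← hrest]
        rw [pv_foldA_tag _ htag]
        split
        · next heq => simp at heq
        · next gt0 rest0 heq =>
          injection heq with h1 h2
          subst h1
          subst h2
          split
          · next heq2 => simp
          · next gt1 rest21 heq2 =>
            rw [hdrop2] at heq2
            simp at heq2
      | cons gt rest2 =>
        have hgt : gt = '>' := by
          have := pv_dropWhile_cons_head hdrop2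
          simpa using this
        have hlen2 : (gt :: rest2).length ≤ rest.length :=
          hdrop2 ▸ List.length_dropWhile_le (fun c => decide (c ≠ '>')) rest
        have hrest2 : rest2.length ≤ n := by
          simp at hlen hlen2; omega
        conv_lhs => rw [← hrest_split]
        rw [List.foldl_append, pv_foldA_tag _ htag, hdrop2]
        subst hgt
        rw [List.foldl_cons]
        have hstep2 : ∀ acc : List Char, pvStepA (acc, true) '>' = (acc ++ ['>'], false) := by
          intro acc; simp [pvStepA]
        rw [hstep2, ih rest2 hrest2]
        split
        · next heq => simp at heq
        · next gt0 rest0 heq =>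
          injection heq with h1 h2
          subst h1
          subst h2
          split
          · next heq2 =>
            rw [hdrop2] at heq2
            simp at heq2
          · next gt1 rest21 heq2 =>
            rw [hdrop2] at heq2
            injection heq2 with h3 h4
            subst h3
            subst h4
            simp

lemma pv_lineA_eq_lineB (cs : List Char) : pvReplaceLineA cs = pvRenderB cs := by
  have := pv_foldA_eq_renderB cs.length cs le_rfl []
  simpa [pvReplaceLineA] using this

-- ===== VERDICT (by name: the statement is the Claim_ definition above) =====
theorem replace_spaces_and_linebreaks_py_spec : Claim_equal_replace_spaces_and_linebreaks_py := by
  intro html _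
  unfold Spec_replace_spaces_and_linebreaks_py replace_spaces_and_linebreaks_py
    replace_spaces_and_linebreaks_py_alt
  congr 2
  exact List.map_congr_left (fun cs _ => pv_lineA_eq_lineB cs)
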